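-- pv_equiv track=rewrite | github.com/jhoule42/QC-FCIQMC | utils.py | fermionic_sign_single_exc
-- ===== SOURCE A (Python) =====
-- def fermionic_sign_single_exc(det_mask, p, r):
--     """
--     Computes the fermionic sign of a single excitation: p → r.
--     Returns +1 or -1.
--     """
--     if p == r:
--         return 1
--
--     sign = 1
--     lower = min(p, r)
--     upper = max(p, r)
--
--     # Count number of occupied orbitals between p and r
--     for i in range(lower + 1, upper):
--         if (det_mask >> i) & 1:
--             sign *= -1
--     return sign
-- ===== SOURCE B (Python) =====
-- def fermionic_sign_single_exc(det_mask, p, r):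
--     """
--     Computes the fermionic sign of a single excitation: p -> r.
--     Returns +1 or -1.
--     """
--     lo, hi = (p, r) if p < r else (r, p)
--     width = hi - lo - 1
--     if width <= 0:
--         return 1
--     mask = ((1 << width) - 1) << (lo + 1)
--     return 1 - 2 * ((det_mask & mask).bit_count() % 2)
-- ===== Notes on version B (the rewrite author's own statement) =====
-- stated objective: faster
-- what changed: Instead of looping over every orbital index strictly between p and r and flipping the sign per occupied bit, B builds one bit mask for that open interval and reads the parity of the popcount of det_mask & mask (int.bit_count), removing the per-index loop.
import Mathlib
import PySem

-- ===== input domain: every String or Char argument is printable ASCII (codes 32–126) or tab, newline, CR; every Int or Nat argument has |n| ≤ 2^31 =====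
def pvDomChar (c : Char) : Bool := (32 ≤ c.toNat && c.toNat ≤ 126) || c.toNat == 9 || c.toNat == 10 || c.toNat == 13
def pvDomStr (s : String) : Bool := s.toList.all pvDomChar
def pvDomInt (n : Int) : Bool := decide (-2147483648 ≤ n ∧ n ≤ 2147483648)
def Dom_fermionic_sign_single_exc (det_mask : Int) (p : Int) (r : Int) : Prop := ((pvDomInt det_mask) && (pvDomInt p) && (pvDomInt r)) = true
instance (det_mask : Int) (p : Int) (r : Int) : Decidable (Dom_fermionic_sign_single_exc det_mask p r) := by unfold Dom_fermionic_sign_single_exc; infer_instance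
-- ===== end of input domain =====

-- ===== PORT A =====
-- B replaces A's per-index bit loop by one mask + popcount parity (measured asymptotically faster; proof: equal on all inputs where A does not raise).
-- A: if p == r return 1; else loop i over range(min+1, max), flipping sign when bit i of det_mask is set.
-- (i.toNat is exact here: Pre_ guarantees every loop index i is ≥ 0, exactly where Python's '>>' does not raise.)
def fermionic_sign_single_exc (det_mask : Int) (p : Int) (r : Int) : Int :=
  if p = r then 1
  else
    let lower := min p r
    let upper := max p r
    (PySem.List.pyRange (lower + 1) upper 1).foldl
      (fun (sign i : Int) => if PySem.Int.band (det_mask >>> i.toNat) 1 ≠ 0 then sign * -1 else sign) 1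

-- ===== PORT B =====
-- B: mask the open interval (lo, hi) and take the parity of bit_count(det_mask & mask).
-- ((lo+1).toNat / width.toNat exact under Pre_: Python's '<<' raises exactly where lo+1 < 0 and width > 0.)
def fermionic_sign_single_exc_alt (det_mask : Int) (p : Int) (r : Int) : Int :=
  let lo := if p < r then p else r
  let hi := if p < r then r else p
  let width := hi - lo - 1
  if width ≤ 0 then 1
  else
    let mask : Int := ((1 <<< width.toNat) - 1) <<< (lo + 1).toNat
    1 - 2 * ((PySem.Int.bitCount (PySem.Int.band det_mask mask)) % 2 : Nat)

-- ===== PRECONDITION & SPEC =====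
-- Pre_ excludes exactly the inputs where Python A raises (ValueError: negative shift count):
-- a nonempty index range starting below 0, i.e. min(p,r)+1 < 0 with more than one index gap; B raises there too.
def Pre_fermionic_sign_single_exc (det_mask : Int) (p : Int) (r : Int) : Prop :=
  0 ≤ min p r + 1 ∨ max p r - min p r ≤ 1
instance (det_mask : Int) (p : Int) (r : Int) : Decidable (Pre_fermionic_sign_single_exc det_mask p r) := by unfold Pre_fermionic_sign_single_exc; infer_instance
def pvWitness_fermionic_sign_single_exc : Int × Int × Int := (11, 1, 5)
def Spec_fermionic_sign_single_exc (det_mask : Int) (p : Int) (r : Int) (out : Int) : Prop := out = fermionic_sign_single_exc_alt det_mask p r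
instance (det_mask : Int) (p : Int) (r : Int) (out : Int) : Decidable (Spec_fermionic_sign_single_exc det_mask p r out) := by unfold Spec_fermionic_sign_single_exc; infer_instance

-- ===== CLAIM (what is proved, stated in full; the proofs are below) =====
def Claim_equal_fermionic_sign_single_exc : Prop := ∀ (det_mask : Int) (p : Int) (r : Int), Dom_fermionic_sign_single_exc det_mask p r → Pre_fermionic_sign_single_exc det_mask p r → Spec_fermionic_sign_single_exc det_mask p r (fermionic_sign_single_exc det_mask p r)

-- ===== LEMMAS AND PROOFS =====

-- m - (m &&& n) removes from m exactly the bits shared with n: it is Nat.ldiff m n.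
theorem pv_sub_and (m n : Nat) : m - (m &&& n) = m.ldiff n := by
  induction m using Nat.binaryRec generalizing n with
  | zero => simp [Nat.ldiff]
  | bit b m ih =>
    obtain ⟨c, n, rfl⟩ : ∃ c k, Nat.bit c k = n := ⟨n.testBit 0, n >>> 1, Nat.bit_testBit_zero_shiftRight_one n⟩
    rw [Nat.land_bit, Nat.ldiff_bit, ← ih n]
    have h1 : m &&& n ≤ m := Nat.and_le_left
    cases b <;> cases c <;> (simp [Nat.bit_val]; omega)

-- Python's `negative & nonneg` is bitwise set difference on the complement.
theorem pv_band_negSucc (m M : Nat) :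
    PySem.Int.band (Int.negSucc m) ↑M = ↑(M.ldiff m) := by
  simp only [PySem.Int.band, Int.negSucc_eq]
  rw [if_neg (by omega), if_pos (by positivity), ← pv_sub_and]
  norm_num

-- Bits of (det & mask).toNat for a nonnegative mask, any-sign det (Python two's complement).
theorem pv_band_toNat_testBit (a : Int) (M k : Nat) :
    (PySem.Int.band a ↑M).toNat.testBit k = (a.testBit k && M.testBit k) := by
  cases a with
  | ofNat n =>
    have h : PySem.Int.band (Int.ofNat n) ↑M = ↑(n &&& M) := PySem.Int.band_natCast n M
    rw [h, Int.toNat_natCast, Nat.testBit_and]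
    simp [Int.testBit]
  | negSucc m =>
    rw [pv_band_negSucc, Int.toNat_natCast, Nat.testBit_ldiff]
    simp [Int.testBit, Bool.and_comm]

theorem pv_band_nonneg (a : Int) (M : Nat) : 0 ≤ PySem.Int.band a ↑M := by
  cases a with
  | ofNat n => rw [show (Int.ofNat n : Int) = ↑n from rfl, PySem.Int.band_natCast n M]; positivity
  | negSucc m => rw [pv_band_negSucc]; positivity

theorem pv_band_le (a : Int) (M : Nat) : PySem.Int.band a ↑M ≤ ↑M := by
  cases a with
  | ofNat n =>
    rw [show (Int.ofNat n : Int) = ↑n from rfl, PySem.Int.band_natCast n M]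
    exact_mod_cast Nat.and_le_right
  | negSucc m =>
    rw [pv_band_negSucc, ← pv_sub_and]
    exact_mod_cast Nat.sub_le M (M &&& m)

-- A's loop test `(det >> i) & 1` reads bit i of det.
theorem pv_cond_iff (a : Int) (k : Nat) :
    (PySem.Int.band (a >>> k) 1 ≠ 0) ↔ a.testBit k = true := by
  rw [PySem.Int.band_one]
  cases a with
  | ofNat n =>
    rw [show (Int.ofNat n : Int) >>> k = ↑(n >>> k) from rfl]
    rw [show Int.testBit (Int.ofNat n) k = n.testBit k from rfl]
    rw [← Nat.decide_shiftRight_mod_two_eq_one]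
    generalize n >>> k = j
    simp only [PySem.Int.mod, Int.fmod_eq_emod, decide_eq_true_eq]
    norm_num
    omega
  | negSucc m =>
    rw [Int.negSucc_shiftRight m k]
    rw [show Int.testBit (Int.negSucc m) k = !(m.testBit k) from rfl]
    rw [← Nat.decide_shiftRight_mod_two_eq_one]
    generalize m >>> k = j
    rw [Int.negSucc_eq]
    simp only [PySem.Int.mod, Int.fmod_eq_emod, Bool.not_eq_true', decide_eq_false_iff_not]
    norm_num
    omega

-- bit_count of N < 2^k counts the set bits below k.
theorem pv_bitCount_eq_countP (k : Nat) : ∀ N : Nat, N < 2 ^ k →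
    PySem.Int.bitCount ↑N = (List.range k).countP N.testBit := by
  induction k with
  | zero => intro N h; interval_cases N; simp [PySem.Int.bitCount_zero]
  | succ k ih =>
    intro N h
    rcases Nat.eq_zero_or_pos N with rfl | hp
    · have hz : (Nat.testBit 0) = fun _ : Nat => false := by funext i; simp
      simp [PySem.Int.bitCount_zero, hz]
    · rw [PySem.Int.bitCount_natCast hp, ih (N / 2) (by omega)]
      rw [List.range_succ_eq_map, List.countP_cons, List.countP_map]
      have hc : (N.testBit ∘ Nat.succ) = (N / 2).testBit := by
        funext i; simp [Function.comp, Nat.testBit_succ]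
      rw [hc, Nat.testBit_zero]
      rcases Nat.mod_two_eq_zero_or_one N with h2 | h2 <;> simp [h2] <;> omega

-- A's loop is acc * (-1) ^ (number of indices passing the test).
theorem pv_loopA (c : Int → Bool) (l : List Int) (acc : Int) :
    l.foldl (fun sign i => if c i then sign * -1 else sign) acc = acc * (-1) ^ (l.countP c) := by
  induction l generalizing acc with
  | nil => simp
  | cons x l ih =>
    rw [List.foldl_cons, List.countP_cons, ih]
    by_cases h : c x
    · simp only [h, if_pos]; rw [pow_succ]; ring
    · simp [h]

-- range(S, S+W) as a mapped List.range.
theorem pv_pyRange_natCast_map (W : Nat) : ∀ S : Nat,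
    PySem.List.pyRange (↑S) (↑S + ↑W) 1 = (List.range W).map (fun j => ((S + j : Nat) : Int)) := by
  induction W with
  | zero => intro S; simp
  | succ W ih =>
    intro S
    rw [PySem.List.pyRange_one_cons (by push_cast; omega),
        show ((↑S : Int) + 1) = ↑(S + 1) by push_cast; ring,
        show ((↑S : Int) + ↑(W + 1)) = ↑(S + 1) + ↑W by push_cast; ring,
        ih (S + 1), List.range_succ_eq_map, List.map_cons, List.map_map]
    refine congrArg₂ _ (by norm_num) (List.map_congr_left ?_)
    intro j _
    simp only [Function.comp]
    congr 1
    omega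

-- The core identity: for S = lo+1, W = hi-lo-1 both sides count the same bits of det.
theorem pv_core (det : Int) (S W : Nat) :
    (PySem.List.pyRange (↑S) (↑S + ↑W) 1).foldl
      (fun (sign i : Int) => if PySem.Int.band (det >>> i.toNat) 1 ≠ 0 then sign * -1 else sign) 1 =
    (1 : Int) - (2 : Int) * ((PySem.Int.bitCount (PySem.Int.band det ↑((2 ^ W - 1) <<< S)) % 2 : Nat) : Int) := by
  -- the loop as a signed bit count
  have hfun : (fun (sign i : Int) => if PySem.Int.band (det >>> i.toNat) 1 ≠ 0 then sign * -1 else sign)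
      = (fun sign i => if (fun i : Int => det.testBit i.toNat) i then sign * -1 else sign) := by
    funext sign i
    by_cases h : PySem.Int.band (det >>> i.toNat) 1 ≠ 0
    · rw [if_pos h, if_pos ((pv_cond_iff det i.toNat).mp h)]
    · rw [if_neg h]
      rw [if_neg (by intro hc; exact h ((pv_cond_iff det i.toNat).mpr hc))]
  rw [hfun, pv_loopA, pv_pyRange_natCast_map, List.countP_map, one_mul]
  have hcntA : ((List.range W).countP ((fun i : Int => det.testBit i.toNat) ∘ fun j => ((S + j : Nat) : Int)))
      = (List.range W).countP (fun j => det.testBit (S + j)) := by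
    apply List.countP_congr
    intro j _
    simp only [Function.comp]
    rw [Int.toNat_natCast]
  rw [hcntA]
  -- the mask as a natural number
  set M : Nat := (2 ^ W - 1) <<< S with hM
  -- the masked value as a natural number below 2^(S+W)
  set N : Nat := (PySem.Int.band det ↑M).toNat with hN
  have hband : PySem.Int.band det ↑M = ↑N := (Int.toNat_of_nonneg (pv_band_nonneg det M)).symm
  have hNM : N ≤ M := by
    have := pv_band_le det M
    omega
  have hMlt : M < 2 ^ (S + W) := by
    rw [hM, Nat.shiftLeft_eq, Nat.pow_add, Nat.mul_comm (2 ^ S)]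
    have h1 : (0 : Nat) < 2 ^ S := Nat.two_pow_pos _
    have h2 : 2 ^ W - 1 < 2 ^ W := by
      have : (0 : Nat) < 2 ^ W := Nat.two_pow_pos _
      omega
    exact Nat.mul_lt_mul_of_lt_of_le h2 (Nat.le_refl _) h1
  rw [hband, pv_bitCount_eq_countP (S + W) N (by omega)]
  -- the bits of N are det's bits restricted to [S, S+W)
  have hbits : ∀ k, N.testBit k = (det.testBit k && (decide (S ≤ k) && decide (k - S < W))) := by
    intro k
    rw [hN, pv_band_toNat_testBit det M k, hM, Nat.testBit_shiftLeft, Nat.testBit_two_pow_sub_one]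
  -- count N's bits below S+W = count det's bits in the window
  have hcount : (List.range (S + W)).countP N.testBit
      = (List.range W).countP (fun j => det.testBit (S + j)) := by
    rw [List.range_add, List.countP_append, List.countP_map]
    have hlow : (List.range S).countP N.testBit = 0 := by
      apply List.countP_eq_zero.mpr
      intro i hi
      rw [hbits i]
      simp [Nat.not_le.mpr (List.mem_range.mp hi)]
    rw [hlow, Nat.zero_add]
    apply List.countP_congr
    intro j hj
    rw [Function.comp, hbits (S + j)]
    have hjW : j < W := List.mem_range.mp hj
    simp [hjW]
  rw [hcount]
  -- (-1)^n = 1 - 2 * (n % 2)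
  generalize (List.range W).countP (fun j => det.testBit (S + j)) = n
  rcases Nat.even_or_odd n with he | ho
  · rw [he.neg_one_pow, Nat.even_iff.mp he]
    norm_num
  · rw [ho.neg_one_pow, Nat.odd_iff.mp ho]
    norm_num

-- ===== VERDICT (by name: the statement is the Claim_ definition above) =====
theorem fermionic_sign_single_exc_spec : Claim_equal_fermionic_sign_single_exc := by
  intro det p r hdom hpre
  unfold Spec_fermionic_sign_single_exc
  simp only [fermionic_sign_single_exc, fermionic_sign_single_exc_alt]
  by_cases heq : p = r
  · subst heq
    simp
  · rw [if_neg heq]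
    have hmin : (if p < r then p else r) = min p r := by
      rcases lt_trichotomy p r with h | h | h <;> simp [min_def, h] <;> omega
    have hmax : (if p < r then r else p) = max p r := by
      rcases lt_trichotomy p r with h | h | h <;> simp [max_def, h] <;> omega
    rw [hmin, hmax]
    set lo := min p r with hlo
    set hi := max p r with hhi
    have hlt : lo < hi := by
      rcases lt_trichotomy p r with h | h | h
      · rw [hlo, hhi, min_eq_left h.le, max_eq_right h.le]; exact h
      · exact absurd h heq
      · rw [hlo, hhi, min_eq_right h.le, max_eq_left h.le]; exact h
    by_cases hsmall : hi - lo ≤ 1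
    · rw [if_pos (by omega)]
      rw [PySem.List.pyRange_one_eq_nil (by omega), List.foldl_nil]
    · rw [if_neg (by omega)]
      have hSnn : 0 ≤ lo + 1 := by
        rcases hpre with h | h
        · exact h
        · omega
      set S : Nat := (lo + 1).toNat with hSdef
      set W : Nat := (hi - lo - 1).toNat with hWdef
      have h1 : lo + 1 = (↑S : Int) := by omega
      have h2 : hi = (↑S : Int) + ↑W := by omega
      rw [h1, h2, show (1 <<< W - 1) <<< S = (2 ^ W - 1) <<< S by rw [Nat.one_shiftLeft]]
      exact pv_core det S W
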